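-- pv_equiv track=rewrite | github.com/open-data/ckanext-canada | bin/warehouse/csv_diff.py | find_removed_and_created_keys
-- ===== SOURCE A (Python) =====
-- def find_removed_and_created_keys(prev, curr):
--     """
--
--     :param prev: Older CSV
--     :param curr: Newer CSV
--     :return: The keys that were removed/added between the 2 CSVs, and the keys which MAY be modified
--     """
--     removed_keys = {}
--     added_keys = {}
--     mod_keys = {}
--
--     for key in prev:
--         if not key in curr:
--             removed_keys[key] = ''
--     for key in curr:
--         if not key in prev:
--             added_keys[key]=''
--         else:
--             mod_keys[key]=''
--
--     return removed_keys, added_keys, mod_keys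
-- ===== SOURCE B (Python) =====
-- def find_removed_and_created_keys(prev, curr):
--     """
--
--     :param prev: Older CSV
--     :param curr: Newer CSV
--     :return: The keys that were removed/added between the 2 CSVs, and the keys which MAY be modified
--     """
--     status = {}
--     for key in curr:
--         status[key] = 2
--     for key in prev:
--         status[key] = status.get(key, 0) + 1
--     removed_keys = {k: '' for k, v in status.items() if v == 1}
--     added_keys = {k: '' for k, v in status.items() if v == 2}
--     mod_keys = {k: '' for k, v in status.items() if v == 3}
--     return removed_keys, added_keys, mod_keys
-- ===== Notes on version B (the rewrite author's own statement) =====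
-- stated objective: alternative
-- what changed: Replaces A's two cross-membership loops with a mark-and-classify pass: one tag dictionary marks curr keys with 2 and adds 1 for prev keys, then the three result dicts are read off by tag value (1 = removed, 2 = added, 3 = modified), with no membership test of one collection against the other.
import Mathlib
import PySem

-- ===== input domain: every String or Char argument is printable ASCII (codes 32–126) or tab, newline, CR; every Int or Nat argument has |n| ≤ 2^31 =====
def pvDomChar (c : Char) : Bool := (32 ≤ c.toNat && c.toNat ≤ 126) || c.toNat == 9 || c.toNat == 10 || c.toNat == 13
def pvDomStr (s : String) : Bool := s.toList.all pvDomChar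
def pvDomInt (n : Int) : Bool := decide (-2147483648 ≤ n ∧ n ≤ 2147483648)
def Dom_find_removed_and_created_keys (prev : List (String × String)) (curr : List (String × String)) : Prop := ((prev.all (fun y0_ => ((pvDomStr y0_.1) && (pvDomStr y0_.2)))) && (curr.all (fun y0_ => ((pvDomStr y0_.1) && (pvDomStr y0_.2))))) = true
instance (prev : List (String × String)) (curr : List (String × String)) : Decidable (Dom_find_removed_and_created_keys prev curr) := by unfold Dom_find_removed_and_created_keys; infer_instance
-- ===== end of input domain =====

-- B replaces A's two cross-membership loops with a mark-and-classify pass: one tag dictionary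
-- marks every curr key with 2 and adds 1 for every prev key, then the three result dicts are
-- read off by tag value (1 = removed, 2 = added, 3 = modified) — alternative, same cost.
-- The dict parameters are association lists; dict iteration is over the keys in
-- first-occurrence order (PySem.Set.ofList of the key list), as for a Python dict.

-- ===== PORT A =====
def find_removed_and_created_keys (prev : List (String × String)) (curr : List (String × String)) : (List (String × String)) × (List (String × String)) × (List (String × String)) :=
  -- removed_keys = {}; for key in prev: if not key in curr: removed_keys[key] = ''
  let removed_keys : PySem.Dict String String :=
    (PySem.Set.ofList (prev.map (·.1))).foldl
      (fun d key => if !((curr.map (·.1)).contains key) then d.insert key "" else d)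
      PySem.Dict.empty
  -- for key in curr: if not key in prev: added_keys[key]='' else: mod_keys[key]=''
  let am : PySem.Dict String String × PySem.Dict String String :=
    (PySem.Set.ofList (curr.map (·.1))).foldl
      (fun p key => if !((prev.map (·.1)).contains key)
                    then (p.1.insert key "", p.2)
                    else (p.1, p.2.insert key ""))
      (PySem.Dict.empty, PySem.Dict.empty)
  (removed_keys.items, am.1.items, am.2.items)

-- ===== PORT B =====
def find_removed_and_created_keys_alt (prev : List (String × String)) (curr : List (String × String)) : (List (String × String)) × (List (String × String)) × (List (String × String)) :=
  -- status = {}; for key in curr: status[key] = 2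
  let status0 : PySem.Dict String Int :=
    (PySem.Set.ofList (curr.map (·.1))).foldl (fun d key => d.insert key 2) PySem.Dict.empty
  -- for key in prev: status[key] = status.get(key, 0) + 1
  let status : PySem.Dict String Int :=
    (PySem.Set.ofList (prev.map (·.1))).foldl (fun d key => d.insert key (d.getD key 0 + 1)) status0
  -- {k: '' for k, v in status.items() if v == t} for t = 1, 2, 3
  ((status.items.filter (fun kv => kv.2 == 1)).map (fun kv => (kv.1, "")),
   (status.items.filter (fun kv => kv.2 == 2)).map (fun kv => (kv.1, "")),
   (status.items.filter (fun kv => kv.2 == 3)).map (fun kv => (kv.1, "")))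

-- ===== PRECONDITION & SPEC =====
def Spec_find_removed_and_created_keys (prev : List (String × String)) (curr : List (String × String)) (out : (List (String × String)) × (List (String × String)) × (List (String × String))) : Prop := out = find_removed_and_created_keys_alt prev curr
instance (prev : List (String × String)) (curr : List (String × String)) (out : (List (String × String)) × (List (String × String)) × (List (String × String))) : Decidable (Spec_find_removed_and_created_keys prev curr out) := by unfold Spec_find_removed_and_created_keys; infer_instance

-- ===== CLAIM (what is proved, stated in full; the proofs are below) =====
def Claim_equal_find_removed_and_created_keys : Prop := ∀ (prev : List (String × String)) (curr : List (String × String)), Dom_find_removed_and_created_keys prev curr → Spec_find_removed_and_created_keys prev curr (find_removed_and_created_keys prev curr)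

-- ===== LEMMAS AND PROOFS =====

-- ---- A-side: each of A's three dicts is a filter of a key sequence ----

-- a conditional-insert loop is an insert loop over the filtered list
theorem foldl_ite_insert (p : String → Bool) (l : List String) (d : PySem.Dict String String) :
    l.foldl (fun d k => if p k then d.insert k "" else d) d
      = (l.filter p).foldl (fun d k => d.insert k "") d := by
  induction l generalizing d with
  | nil => rfl
  | cons x xs ih =>
      simp only [List.foldl_cons, List.filter_cons]
      cases h : p x <;> simp [ih]

-- items of an insert loop over distinct fresh keys, from the empty dict
theorem items_insert_loop (l : List String) (hnd : l.Nodup) :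
    ((l.foldl (fun d k => d.insert k "") (PySem.Dict.empty : PySem.Dict String String)).items)
      = l.map (fun k => (k, "")) := by
  have h := PySem.Dict.items_foldl_insert_fresh (l := l) (k := id) (v := fun _ => "")
      (d := (PySem.Dict.empty : PySem.Dict String String))
      (by intro a _; exact PySem.Dict.contains_empty a) (by simpa using hnd)
  simpa using h

-- set(list) membership test equals membership in the original list
theorem set_ofList_contains (l : List String) (x : String) :
    List.contains (PySem.Set.ofList l) x = l.contains x := by
  simp only [List.contains_eq_mem]
  exact decide_eq_decide.mpr (PySem.Set.mem_ofList _ _)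

-- the combined items of a conditional-insert loop as a filter-and-map
theorem items_cond_loop (p : String → Bool) (l : List String) (hnd : l.Nodup) :
    ((l.foldl (fun d k => if p k then d.insert k "" else d)
        (PySem.Dict.empty : PySem.Dict String String)).items)
      = (l.filter p).map (fun k => (k, "")) := by
  rw [foldl_ite_insert]
  exact items_insert_loop _ (hnd.filter p)

-- A's second loop updates two dicts; split it into the two independent loops
theorem foldl_pair_split (c : String → Bool) (l : List String)
    (a b : PySem.Dict String String) :
    l.foldl (fun p key => if c key then (p.1.insert key "", p.2) else (p.1, p.2.insert key "")) (a, b)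
      = (l.foldl (fun d key => if c key then d.insert key "" else d) a,
         l.foldl (fun d key => if c key then d else d.insert key "") b) := by
  induction l generalizing a b with
  | nil => rfl
  | cons x xs ih =>
      simp only [List.foldl_cons]
      cases h : c x <;> simp only [Bool.false_eq_true, if_true, if_false] <;> exact ih _ _

-- ---- B-side: the items of the tag dictionary ----

-- effect of B's 'status[key] = status.get(key, 0) + 1' loop on the items list:
-- keys already present get their tag bumped in place, fresh keys are appended with tag 1
theorem bump_items (P : List String) (hnd : P.Nodup) (d : PySem.Dict String Int)
    (hk : d.keys.Nodup) :
    (P.foldl (fun d k => d.insert k (d.getD k 0 + 1)) d).items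
      = d.items.map (fun kv => if P.contains kv.1 then (kv.1, kv.2 + 1) else kv)
        ++ (P.filter (fun k => !d.contains k)).map (fun k => (k, (1 : Int))) := by
  induction P generalizing d with
  | nil => simp
  | cons x xs ih =>
      rcases List.nodup_cons.mp hnd with ⟨hx, hxs⟩
      simp only [List.foldl_cons, List.filter_cons]
      have hk' : ((d.insert x (d.getD x 0 + 1)).keys).Nodup := PySem.Dict.nodup_keys_insert _ _ _ hk
      rw [ih hxs _ hk']
      by_cases h : d.contains x = true
      · rw [PySem.Dict.items_insert_of_contains _ _ h]
        have h1 : ((d.items.map (fun p => if p.1 == x then (x, d.getD x 0 + 1) else p)).map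
              (fun kv => if xs.contains kv.1 then (kv.1, kv.2 + 1) else kv))
            = d.items.map (fun kv => if (x :: xs).contains kv.1 then (kv.1, kv.2 + 1) else kv) := by
          rw [List.map_map]
          apply List.map_congr_left
          intro p hp
          by_cases hpx : p.1 = x
          · have : d.getD x 0 = p.2 := by
              subst hpx
              exact PySem.Dict.getD_of_mem_items _ hp hk 0
            simp [Function.comp, hpx, this, List.contains_eq_mem, hx]
          · simp [Function.comp, hpx, List.contains_eq_mem]
        have h2 : (xs.filter (fun k => !(d.insert x (d.getD x 0 + 1)).contains k))
            = xs.filter (fun k => !d.contains k) := by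
          apply List.filter_congr
          intro k hkmem
          have hkx : (k == x) = false := by
            simp only [beq_eq_false_iff_ne, ne_eq]
            intro hkeq; exact hx (hkeq ▸ hkmem)
          rw [PySem.Dict.contains_insert, hkx, Bool.false_or]
        rw [h1, h2, h]
        simp
      · have hfalse : d.contains x = false := by simpa using h
        have hget : d.getD x 0 = 0 := PySem.Dict.getD_of_not_contains _ _ hfalse
        rw [PySem.Dict.items_insert_of_not_contains _ _ hfalse, hget]
        have hnotkey : ∀ p ∈ d.items, p.1 ≠ x := by
          intro p hp hpx
          have : d.contains p.1 = true := by
            rw [PySem.Dict.contains_iff_mem_keys]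
            exact PySem.Dict.mem_keys_of_mem_items _ hp
          rw [hpx] at this
          exact h this
        have h1 : ((d.items ++ [(x, (0 : Int) + 1)]).map
              (fun kv => if xs.contains kv.1 then (kv.1, kv.2 + 1) else kv))
            = d.items.map (fun kv => if (x :: xs).contains kv.1 then (kv.1, kv.2 + 1) else kv)
              ++ [(x, (1 : Int))] := by
          rw [List.map_append]
          congr 1
          · apply List.map_congr_left
            intro p hp
            have := hnotkey p hp
            simp [List.contains_eq_mem, this]
          · simp [List.contains_eq_mem, hx]
        have h2 : (xs.filter (fun k => !(d.insert x ((0 : Int) + 1)).contains k))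
            = xs.filter (fun k => !d.contains k) := by
          apply List.filter_congr
          intro k hkmem
          have hkx : (k == x) = false := by
            simp only [beq_eq_false_iff_ne, ne_eq]
            intro hkeq; exact hx (hkeq ▸ hkmem)
          rw [PySem.Dict.contains_insert, hkx, Bool.false_or]
        rw [h1, h2, hfalse]
        simp [List.append_assoc]

-- classifying the tagged curr keys by tag value (q is 'key was in prev')
theorem filter_tag_one (C : List String) (q : String → Bool) :
    ((C.map (fun k => if q k then (k, (3 : Int)) else (k, 2))).filter
        (fun kv => kv.2 == 1)) = [] := by
  induction C with
  | nil => rfl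
  | cons x xs ih => cases h : q x <;> simp [h, ih]

theorem filter_tag_two (C : List String) (q : String → Bool) :
    ((C.map (fun k => if q k then (k, (3 : Int)) else (k, 2))).filter
        (fun kv => kv.2 == 2))
      = (C.filter (fun k => !q k)).map (fun k => (k, (2 : Int))) := by
  induction C with
  | nil => rfl
  | cons x xs ih => cases h : q x <;> simp [h, ih]

theorem filter_tag_three (C : List String) (q : String → Bool) :
    ((C.map (fun k => if q k then (k, (3 : Int)) else (k, 2))).filter
        (fun kv => kv.2 == 3))
      = (C.filter (fun k => q k)).map (fun k => (k, (3 : Int))) := by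
  induction C with
  | nil => rfl
  | cons x xs ih => cases h : q x <;> simp [h, ih]

-- ===== VERDICT (by name: the statement is the Claim_ definition above) =====
theorem find_removed_and_created_keys_spec : Claim_equal_find_removed_and_created_keys := by
  intro prev curr _
  unfold Spec_find_removed_and_created_keys
  simp only [find_removed_and_created_keys, find_removed_and_created_keys_alt]
  rw [foldl_pair_split]
  -- names for the key sequences
  set Pk := prev.map (·.1) with hPk
  set Ck := curr.map (·.1) with hCk
  -- A's three dicts as filters
  have hmod : (fun (d : PySem.Dict String String) key =>
      if !(Pk.contains key) then d else d.insert key "")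
      = (fun d key => if Pk.contains key then d.insert key "" else d) := by
    funext d k
    cases Pk.contains k <;> simp only [Bool.not_false, Bool.not_true,
      Bool.false_eq_true, if_true, if_false]
  rw [hmod]
  rw [items_cond_loop _ _ (PySem.Set.nodup_ofList _),
      items_cond_loop _ _ (PySem.Set.nodup_ofList _),
      items_cond_loop _ _ (PySem.Set.nodup_ofList _)]
  -- B's status dict
  have hC : ((PySem.Set.ofList Ck).foldl (fun d key => d.insert key (2 : Int))
      (PySem.Dict.empty : PySem.Dict String Int)).items
      = (PySem.Set.ofList Ck).map (fun k => (k, (2 : Int))) := by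
    have h := PySem.Dict.items_foldl_insert_fresh (l := PySem.Set.ofList Ck) (k := id)
        (v := fun _ => (2 : Int)) (d := (PySem.Dict.empty : PySem.Dict String Int))
        (by intro a _; exact PySem.Dict.contains_empty a)
        (by simp [PySem.Set.nodup_ofList Ck])
    simpa using h
  have hCkeys : ((PySem.Set.ofList Ck).foldl (fun d key => d.insert key (2 : Int))
      (PySem.Dict.empty : PySem.Dict String Int)).keys = PySem.Set.ofList Ck := by
    have h := PySem.Dict.keys_foldl_insert (ν := Int) (PySem.Set.ofList Ck) (fun _ _ => 2)
      PySem.Dict.empty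
    rw [PySem.Dict.keys_empty] at h
    rw [h, PySem.Set.update_nil_left]
    exact PySem.Set.ofList_ofList _
  have hCcont : ∀ k, ((PySem.Set.ofList Ck).foldl (fun d key => d.insert key (2 : Int))
      (PySem.Dict.empty : PySem.Dict String Int)).contains k = Ck.contains k := by
    intro k
    rw [PySem.Dict.contains_eq_decide_mem_keys, hCkeys, ← List.contains_eq_mem]
    exact set_ofList_contains _ _
  have hst := bump_items (PySem.Set.ofList Pk) (PySem.Set.nodup_ofList Pk)
      ((PySem.Set.ofList Ck).foldl (fun d key => d.insert key (2 : Int))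
        (PySem.Dict.empty : PySem.Dict String Int))
      (by rw [hCkeys]; exact PySem.Set.nodup_ofList Ck)
  rw [hC] at hst
  have hmapmap : ((PySem.Set.ofList Ck).map (fun k => (k, (2 : Int)))).map
      (fun kv => if List.contains (PySem.Set.ofList Pk) kv.1 then (kv.1, kv.2 + 1) else kv)
      = (PySem.Set.ofList Ck).map
          (fun k => if List.contains (PySem.Set.ofList Pk) k then (k, (3 : Int)) else (k, 2)) := by
    rw [List.map_map]
    apply List.map_congr_left
    intro k _
    by_cases h : List.contains (PySem.Set.ofList Pk) k = true <;> simp [Function.comp]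
  rw [hmapmap] at hst
  have hfilt : ((PySem.Set.ofList Pk).filter (fun k => !((PySem.Set.ofList Ck).foldl
        (fun d key => d.insert key (2 : Int))
        (PySem.Dict.empty : PySem.Dict String Int)).contains k))
      = (PySem.Set.ofList Pk).filter (fun k => !(Ck.contains k)) := by
    apply List.filter_congr
    intro k _
    rw [hCcont]
  rw [hfilt] at hst
  rw [hst]
  -- now compute all three filters
  simp only [List.filter_append, List.map_append,
    filter_tag_one, filter_tag_two, filter_tag_three]
  refine congrArg₂ Prod.mk ?_ (congrArg₂ Prod.mk ?_ ?_)
  · -- removed: tag 1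
    simp [List.filter_map, List.map_map, Function.comp]
  · -- added: tag 2
    have : (((PySem.Set.ofList Pk).filter (fun k => !(Ck.contains k))).map
        (fun k => (k, (1 : Int)))).filter (fun kv => kv.2 == 2) = [] := by
      rw [List.filter_map]
      simp [Function.comp]
    rw [this, List.map_nil, List.append_nil, List.map_map]
    have hpred : ((PySem.Set.ofList Ck).filter (fun k => !List.contains (PySem.Set.ofList Pk) k))
        = (PySem.Set.ofList Ck).filter (fun key => !Pk.contains key) := by
      apply List.filter_congr
      intro k _
      rw [set_ofList_contains]
    rw [hpred]
    apply List.map_congr_left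
    intro k _
    rfl
  · -- mod: tag 3
    have : (((PySem.Set.ofList Pk).filter (fun k => !(Ck.contains k))).map
        (fun k => (k, (1 : Int)))).filter (fun kv => kv.2 == 3) = [] := by
      rw [List.filter_map]
      simp [Function.comp]
    rw [this, List.map_nil, List.append_nil, List.map_map]
    have hpred : ((PySem.Set.ofList Ck).filter (fun k => List.contains (PySem.Set.ofList Pk) k))
        = (PySem.Set.ofList Ck).filter Pk.contains := by
      apply List.filter_congr
      intro k _
      rw [set_ofList_contains]
    rw [hpred]
    apply List.map_congr_left
    intro k _
    rfl
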